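-- pv_equiv track=rewrite | github.com/lhy0718/RepoAgents | src/reporepublic/release_assets.py | normalize_release_asset_formats
-- ===== SOURCE A (Python) =====
-- VALID_RELEASE_ASSET_FORMATS = ("json", "markdown")
--
-- def normalize_release_asset_formats(
--     formats: tuple[str, ...] | list[str] | None,
-- ) -> tuple[str, ...]:
--     if not formats:
--         return ("json",)
--     normalized: list[str] = []
--     for value in formats:
--         lowered = value.strip().lower()
--         if not lowered:
--             continue
--         if lowered == "all":
--             for item in VALID_RELEASE_ASSET_FORMATS:
--                 if item not in normalized:
--                     normalized.append(item)
--             continue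
--         if lowered not in VALID_RELEASE_ASSET_FORMATS:
--             raise ValueError(
--                 "Unsupported release asset format. Expected one of: json, markdown, all"
--             )
--         if lowered not in normalized:
--             normalized.append(lowered)
--     return tuple(normalized or ("json",))
-- ===== SOURCE B (Python) =====
-- VALID_RELEASE_ASSET_FORMATS = ("json", "markdown")
--
-- def normalize_release_asset_formats(formats):
--     if not formats:
--         return ("json",)
--     words = [w for w in (v.strip().lower() for v in formats) if w]
--     if any(w not in VALID_RELEASE_ASSET_FORMATS + ("all",) for w in words):
--         raise ValueError(
--             "Unsupported release asset format. Expected one of: json, markdown, all"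
--         )
--     stream = []
--     for w in words:
--         stream.extend(VALID_RELEASE_ASSET_FORMATS if w == "all" else (w,))
--     present = [f for f in VALID_RELEASE_ASSET_FORMATS if f in stream]
--     present.sort(key=stream.index)
--     return tuple(present or ("json",))
-- ===== Notes on version B (the rewrite author's own statement) =====
-- stated objective: alternative
-- what changed: Instead of A's single pass that appends each valid format into the result under an inline 'not in' membership guard, B first validates every kept word, then expands the words into one stream of contributed formats and builds the result by selecting the valid formats present in the stream and sorting them by their first index in it (no incremental dedup at all).
import Mathlib
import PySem

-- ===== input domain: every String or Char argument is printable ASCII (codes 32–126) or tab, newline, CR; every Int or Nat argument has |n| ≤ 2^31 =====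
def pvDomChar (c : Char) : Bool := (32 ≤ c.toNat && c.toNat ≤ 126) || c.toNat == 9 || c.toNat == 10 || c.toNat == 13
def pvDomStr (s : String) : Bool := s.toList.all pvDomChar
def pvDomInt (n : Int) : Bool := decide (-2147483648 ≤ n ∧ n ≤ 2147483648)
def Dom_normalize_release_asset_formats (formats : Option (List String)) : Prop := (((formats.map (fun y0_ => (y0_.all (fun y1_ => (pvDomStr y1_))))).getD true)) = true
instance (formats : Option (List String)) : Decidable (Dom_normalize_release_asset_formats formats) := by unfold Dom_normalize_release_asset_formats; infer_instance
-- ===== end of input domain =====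

-- B validates all entries first, then expands the kept words into one stream and
-- orders the valid formats present by their first index in that stream via a keyed
-- sort, instead of A's incremental membership-guarded appends (objective: alternative).


-- ===== PORT A =====
def pvValidFormats : List String := ["json", "markdown"]

-- A's loop: `none` = the ValueError branch (excluded by Pre_)
def pvLoopA : List String → List String → Option (List String)
  | norm, [] => some norm
  | norm, v :: rest =>
    let lowered := PySem.Str.lower (PySem.Str.strip v)
    if lowered = "" then pvLoopA norm rest
    else if lowered = "all" then
      pvLoopA (pvValidFormats.foldl (fun n item => if item ∈ n then n else n ++ [item]) norm) rest
    else if lowered ∈ pvValidFormats then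
      pvLoopA (if lowered ∈ norm then norm else norm ++ [lowered]) rest
    else none

def normalize_release_asset_formats (formats : Option (List String)) : List String :=
  match formats with
  | none => ["json"]
  | some fs =>
    if fs = [] then ["json"]
    else
      match pvLoopA [] fs with
      | none => []          -- ValueError in Python; unreachable under Pre_
      | some normalized => if normalized = [] then ["json"] else normalized

-- ===== PORT B =====
-- words = [w for w in (v.strip().lower() for v in formats) if w]
def pvWords (fs : List String) : List String :=
  (fs.map (fun v => PySem.Str.lower (PySem.Str.strip v))).filter (fun w => w != "")

-- what one word contributes to the stream: the whole valid tuple for "all", else itself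
def pvExpand (w : String) : List String :=
  if w = "all" then pvValidFormats else [w]

def normalize_release_asset_formats_alt (formats : Option (List String)) : List String :=
  match formats with
  | none => ["json"]
  | some fs =>
    if fs = [] then ["json"]
    else
      let words := pvWords fs
      if words.any (fun w => !((pvValidFormats ++ ["all"]).contains w)) then []  -- ValueError; unreachable under Pre_
      else
        let stream := words.foldl (fun s w => s ++ pvExpand w) []
        let present := pvValidFormats.filter (fun f => stream.contains f)
        let sortedp := PySem.List.sorted present (fun f => (PySem.List.index? stream f).getD 0) false
        if sortedp = [] then ["json"] else sortedp

-- ===== PRECONDITION & SPEC =====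
-- Pre_ excludes exactly the inputs on which A raises ValueError: an entry whose
-- stripped+lowered form is neither empty nor "all" nor a valid format.
def Pre_normalize_release_asset_formats (formats : Option (List String)) : Prop :=
  ∀ fs, formats = some fs → ∀ v ∈ fs,
    PySem.Str.lower (PySem.Str.strip v) = "" ∨
    PySem.Str.lower (PySem.Str.strip v) = "all" ∨
    PySem.Str.lower (PySem.Str.strip v) ∈ pvValidFormats
instance (formats : Option (List String)) : Decidable (Pre_normalize_release_asset_formats formats) := by unfold Pre_normalize_release_asset_formats; infer_instance

def pvWitness_normalize_release_asset_formats : Option (List String) :=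
  some ["ALL", " Json ", "", "markdown"]

def Spec_normalize_release_asset_formats (formats : Option (List String)) (out : List String) : Prop := out = normalize_release_asset_formats_alt formats
instance (formats : Option (List String)) (out : List String) : Decidable (Spec_normalize_release_asset_formats formats out) := by unfold Spec_normalize_release_asset_formats; infer_instance

-- ===== CLAIM (what is proved, stated in full; the proofs are below) =====
def Claim_equal_normalize_release_asset_formats : Prop := ∀ (formats : Option (List String)), Dom_normalize_release_asset_formats formats → Pre_normalize_release_asset_formats formats → Spec_normalize_release_asset_formats formats (normalize_release_asset_formats formats)

-- ===== LEMMAS AND PROOFS =====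

-- proof-side collector: the validated stream of contributions, in order (`none` = some invalid word)
def pvCollect? : List String → List String → Option (List String)
  | acc, [] => some acc
  | acc, v :: rest =>
    let lowered := PySem.Str.lower (PySem.Str.strip v)
    if lowered = "" then pvCollect? acc rest
    else if lowered = "all" then pvCollect? (acc ++ pvValidFormats) rest
    else if lowered ∈ pvValidFormats then pvCollect? (acc ++ [lowered]) rest
    else none

-- PySem.Set.add on a String list is exactly A's membership-guarded append
theorem pvSetAdd_eq (n : List String) (x : String) :
    PySem.Set.add n x = if x ∈ n then n else n ++ [x] := by
  simp [PySem.Set.add]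

theorem pvFoldlAdd_eq (xs : List String) : ∀ (n : List String),
    xs.foldl PySem.Set.add n = xs.foldl (fun n item => if item ∈ n then n else n ++ [item]) n := by
  induction xs with
  | nil => intro n; rfl
  | cons x xs ih => intro n; simp [List.foldl, pvSetAdd_eq, ih]

-- collector accumulator lemma
theorem pvCollect?_acc (rest : List String) : ∀ (acc : List String),
    pvCollect? acc rest = (pvCollect? [] rest).map (acc ++ ·) := by
  induction rest with
  | nil => intro acc; simp [pvCollect?]
  | cons v rest ih =>
    intro acc
    simp only [pvCollect?]
    split_ifs with h1 h2 h3
    · exact ih acc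
    · rw [ih (acc ++ _), ih ([] ++ _)]
      cases pvCollect? [] rest <;> simp [List.append_assoc]
    · rw [ih (acc ++ _), ih ([] ++ _)]
      cases pvCollect? [] rest <;> simp [List.append_assoc]
    · rfl

-- A's loop is the collector followed by order-preserving insertion into `norm`
theorem pvLoopA_eq (rest : List String) : ∀ (norm : List String),
    pvLoopA norm rest = (pvCollect? [] rest).map (fun c => c.foldl PySem.Set.add norm) := by
  induction rest with
  | nil => intro norm; simp [pvLoopA, pvCollect?]
  | cons v rest ih =>
    intro norm
    simp only [pvLoopA, pvCollect?, List.nil_append]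
    by_cases h1 : PySem.Str.lower (PySem.Str.strip v) = ""
    · simp only [if_pos h1]; exact ih norm
    · simp only [if_neg h1]
      by_cases h2 : PySem.Str.lower (PySem.Str.strip v) = "all"
      · simp only [if_pos h2]
        rw [ih, pvCollect?_acc rest pvValidFormats]
        cases pvCollect? [] rest <;> simp [List.foldl_append, pvFoldlAdd_eq]
      · simp only [if_neg h2]
        by_cases h3 : PySem.Str.lower (PySem.Str.strip v) ∈ pvValidFormats
        · simp only [if_pos h3]
          rw [← pvSetAdd_eq, ih, pvCollect?_acc rest [PySem.Str.lower (PySem.Str.strip v)]]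
          cases pvCollect? [] rest <;> simp [List.foldl]
        · simp only [if_neg h3]
          rfl

-- on valid input the collector produces exactly B's expanded stream of the kept words
theorem pvCollect?_eq_stream (fs : List String)
    (h : ∀ v ∈ fs,
      PySem.Str.lower (PySem.Str.strip v) = "" ∨
      PySem.Str.lower (PySem.Str.strip v) = "all" ∨
      PySem.Str.lower (PySem.Str.strip v) ∈ pvValidFormats) :
    pvCollect? [] fs = some ((pvWords fs).flatMap pvExpand) := by
  induction fs with
  | nil => simp [pvCollect?, pvWords]
  | cons v rest ih =>
    have hv := h v (List.mem_cons_self)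
    have hrest := ih (fun x hx => h x (List.mem_cons_of_mem _ hx))
    simp only [pvCollect?]
    by_cases h1 : PySem.Str.lower (PySem.Str.strip v) = ""
    · simp only [if_pos h1]
      rw [hrest]
      simp [pvWords, h1]
    · simp only [if_neg h1]
      by_cases h2 : PySem.Str.lower (PySem.Str.strip v) = "all"
      · simp only [if_pos h2]
        rw [pvCollect?_acc, hrest]
        simp [pvWords, pvExpand, h2]
      · have h3 : PySem.Str.lower (PySem.Str.strip v) ∈ pvValidFormats := by
          rcases hv with h0 | h0 | h0
          · exact absurd h0 h1
          · exact absurd h0 h2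
          · exact h0
        simp only [if_neg h2, if_pos h3]
        rw [pvCollect?_acc, hrest]
        simp [pvWords, pvExpand, h1, h2]

-- every element of the stream is a valid format
theorem pvStream_valid (fs : List String)
    (h : ∀ v ∈ fs,
      PySem.Str.lower (PySem.Str.strip v) = "" ∨
      PySem.Str.lower (PySem.Str.strip v) = "all" ∨
      PySem.Str.lower (PySem.Str.strip v) ∈ pvValidFormats) :
    ∀ x ∈ (pvWords fs).flatMap pvExpand, x ∈ pvValidFormats := by
  intro x hx
  rcases List.mem_flatMap.mp hx with ⟨w, hw, hxw⟩
  have hw' : (∃ v ∈ fs, PySem.Str.lower (PySem.Str.strip v) = w) ∧ ¬ w = "" := by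
    simpa [pvWords, List.mem_filter] using hw
  rcases hw' with ⟨⟨v, hv, hlw⟩, hne⟩
  rcases h v hv with h0 | h0 | h0 <;> rw [hlw] at h0
  · exact absurd h0 hne
  · simpa [pvExpand, h0] using hxw
  · have hall : w ≠ "all" := by rintro rfl; revert h0; decide
    simp only [pvExpand, if_neg hall, List.mem_singleton] at hxw
    exact hxw ▸ h0

-- set(s) in first-occurrence order is strictly increasing under first-index keys
theorem pvOfList_pairwise_idx (s : List String) :
    (PySem.Set.ofList s).Pairwise
      (fun a b => (PySem.List.index? s a).getD 0 < (PySem.List.index? s b).getD 0) := by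
  induction s with
  | nil => simp [PySem.Set.ofList_nil]
  | cons x t ih =>
    rw [PySem.Set.ofList_cons, List.pairwise_cons]
    constructor
    · intro b hb
      rcases (PySem.Set.mem_discard _ _ _).mp hb with ⟨hbt, hbx⟩
      have hbt' : b ∈ t := (PySem.Set.mem_ofList _ _).mp hbt
      rcases Option.isSome_iff_exists.mp ((PySem.List.index?_isSome_iff t b).mpr hbt') with ⟨k, hk⟩
      rw [PySem.List.index?_cons_self, PySem.List.index?_cons_of_ne t (Ne.symm hbx), hk]
      simp
    · have hsub : List.Sublist (PySem.Set.discard (PySem.Set.ofList t) x) (PySem.Set.ofList t) := by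
        simp only [PySem.Set.discard]
        exact List.filter_sublist
      refine (ih.sublist hsub).imp_of_mem ?_
      intro a b ha hb hab
      rcases (PySem.Set.mem_discard _ _ _).mp ha with ⟨hat, hax⟩
      rcases (PySem.Set.mem_discard _ _ _).mp hb with ⟨hbt, hbx⟩
      rcases Option.isSome_iff_exists.mp
        ((PySem.List.index?_isSome_iff t a).mpr ((PySem.Set.mem_ofList _ _).mp hat)) with ⟨ka, hka⟩
      rcases Option.isSome_iff_exists.mp
        ((PySem.List.index?_isSome_iff t b).mpr ((PySem.Set.mem_ofList _ _).mp hbt)) with ⟨kb, hkb⟩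
      rw [PySem.List.index?_cons_of_ne t (Ne.symm hax), PySem.List.index?_cons_of_ne t (Ne.symm hbx), hka, hkb]
      rw [hka, hkb] at hab
      simpa using Nat.add_lt_add_right hab 1

-- key lemma: ordered dedup of a stream over the valid formats = the present formats
-- sorted by first index in the stream
theorem pvDedup_eq_sorted (s : List String) (h : ∀ x ∈ s, x ∈ pvValidFormats) :
    PySem.List.sorted (pvValidFormats.filter (fun f => s.contains f))
        (fun f => (PySem.List.index? s f).getD 0) false
      = PySem.Set.ofList s := by
  apply PySem.List.sorted_eq_of_perm_of_pairwise_lt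
  · refine (List.perm_ext_iff_of_nodup (PySem.Set.nodup_ofList s) ?_).mpr ?_
    · exact List.Nodup.filter _ (by decide)
    · intro a
      simp only [PySem.Set.mem_ofList, List.mem_filter, List.contains_iff_mem]
      exact ⟨fun ha => ⟨h a ha, ha⟩, fun ha => ha.2⟩
  · exact pvOfList_pairwise_idx s

-- ===== VERDICT (by name: the statement is the Claim_ definition above) =====
theorem normalize_release_asset_formats_spec : Claim_equal_normalize_release_asset_formats := by
  intro formats _ hpre
  unfold Spec_normalize_release_asset_formats
  unfold normalize_release_asset_formats normalize_release_asset_formats_alt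
  cases formats with
  | none => rfl
  | some fs =>
    have hfs := hpre fs rfl
    by_cases hempty : fs = []
    · simp [hempty]
    · simp only [hempty, if_false]
      -- B's validity guard never fires under Pre_
      have hguard : (pvWords fs).any (fun w => !((pvValidFormats ++ ["all"]).contains w)) = false := by
        simp only [List.any_eq_false, Bool.not_eq_true']
        intro w hw
        have hw' : (∃ v ∈ fs, PySem.Str.lower (PySem.Str.strip v) = w) ∧ ¬ w = "" := by
          simpa [pvWords, List.mem_filter] using hw
        rcases hw' with ⟨⟨v, hv, hlw⟩, hne⟩
        rcases hfs v hv with h0 | h0 | h0 <;> rw [hlw] at h0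
        · exact absurd h0 hne
        · simp [h0]
        · simp [List.mem_append, h0]
      simp only [hguard, Bool.false_eq_true, if_false]
      -- both sides reduce to the same stream
      rw [pvLoopA_eq fs [], pvCollect?_eq_stream fs hfs,
        PySem.List.foldl_append_eq_flatMap, List.nil_append, Option.map_some,
        pvDedup_eq_sorted _ (pvStream_valid fs hfs)]
      rfl
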